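-- pv_equiv track=rewrite | github.com/Danieloring10/Tic_Tac_Toe_Ai | CatBot.py | GetCaseCorners
-- ===== SOURCE A (Python) =====
-- def GetCaseCorners(Real_Num,Actual_Position):
--     Case1 = {
--         "1": [-4,0],
--         "2": [-6,+2],
--         "3": [-3,+1],
--         "4": [-5,-1]
--     }
--     Case2 = {
--         "1": [-8,0],
--         "2": [-6,-2],
--         "3": [-3,-1],
--         "4": [-5,-7]
--     }
--     match Real_Num:
--         case 6:
--             for x in Case1:
--                 for y in Case1[x]:
--                     if Actual_Position == Real_Num + int(y):
--                         return x
--         case 8: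
--             for x in Case2:
--
--                 for y in Case2[x]:
--                     if Actual_Position == Real_Num + int(y):
--                         return x
--         case 2:
--             for x in Case1:
--                 for y in Case1[x]:
--                     if Actual_Position == Real_Num - int(y):
--                         return x
--         case 0:
--             for x in Case2:
--                 for y in Case2[x]:
--                     if Actual_Position == Real_Num - int(y):
--                         return x
-- ===== SOURCE B (Python) =====
-- _CASE1 = {"1": [-4, 0], "2": [-6, 2], "3": [-3, 1], "4": [-5, -1]}
-- _CASE2 = {"1": [-8, 0], "2": [-6, -2], "3": [-3, -1], "4": [-5, -7]}
--
-- # Precomputed flat table: (Real_Num, Actual_Position) -> corner label.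
-- _LOOKUP = {
--     (rn, rn + sign * y): x
--     for rn, tbl, sign in [(6, _CASE1, 1), (8, _CASE2, 1), (2, _CASE1, -1), (0, _CASE2, -1)]
--     for x, ys in tbl.items()
--     for y in ys
-- }
--
-- def GetCaseCorners(Real_Num, Actual_Position):
--     return _LOOKUP.get((Real_Num, Actual_Position))
-- ===== Notes on version B (the rewrite author's own statement) =====
-- stated objective: simpler
-- what changed: Replaced the four-way match with nested scans over the case tables by one flat precomputed dict keyed by (Real_Num, Actual_Position); the body is a single .get lookup.
import Mathlib
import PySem

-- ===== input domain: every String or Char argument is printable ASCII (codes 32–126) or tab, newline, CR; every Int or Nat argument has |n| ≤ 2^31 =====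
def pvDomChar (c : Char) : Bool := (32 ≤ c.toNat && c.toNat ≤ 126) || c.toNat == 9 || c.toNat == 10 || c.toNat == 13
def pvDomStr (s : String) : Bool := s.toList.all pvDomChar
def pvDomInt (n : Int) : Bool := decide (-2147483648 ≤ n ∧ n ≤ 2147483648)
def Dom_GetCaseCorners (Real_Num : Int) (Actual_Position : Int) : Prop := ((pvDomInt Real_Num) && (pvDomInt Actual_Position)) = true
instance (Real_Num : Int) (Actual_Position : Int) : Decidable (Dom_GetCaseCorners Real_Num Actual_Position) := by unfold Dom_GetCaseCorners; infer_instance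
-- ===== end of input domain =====

-- B replaces A's four-way match with nested scans by one precomputed flat dict
-- keyed by (Real_Num, Actual_Position); objective: simpler.


-- ===== PORT A =====
-- the two literal case tables of A (dicts: label → list of offsets)
def pvCase1 : List (String × List Int) := [("1", [-4, 0]), ("2", [-6, 2]), ("3", [-3, 1]), ("4", [-5, -1])]
def pvCase2 : List (String × List Int) := [("1", [-8, 0]), ("2", [-6, -2]), ("3", [-3, -1]), ("4", [-5, -7])]

-- the nested 'for x in table: for y in table[x]: if cond(y): return x' loop
def pvScan (tbl : List (String × List Int)) (cond : Int → Bool) : Option String :=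
  match tbl with
  | [] => none
  | (x, ys) :: rest =>
    match ys.find? cond with
    | some _ => some x
    | none => pvScan rest cond

def GetCaseCorners (Real_Num : Int) (Actual_Position : Int) : Option String :=
  if Real_Num = 6 then pvScan pvCase1 (fun y => decide (Actual_Position = Real_Num + y))
  else if Real_Num = 8 then pvScan pvCase2 (fun y => decide (Actual_Position = Real_Num + y))
  else if Real_Num = 2 then pvScan pvCase1 (fun y => decide (Actual_Position = Real_Num - y))
  else if Real_Num = 0 then pvScan pvCase2 (fun y => decide (Actual_Position = Real_Num - y))
  else none

-- ===== PORT B =====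
-- the comprehension building B's flat lookup table, and its one-line body
def pvBCases : List (Int × List (String × List Int) × Int) :=
  [(6, pvCase1, 1), (8, pvCase2, 1), (2, pvCase1, -1), (0, pvCase2, -1)]

def pvLookup : PySem.Dict (Int × Int) String :=
  PySem.Dict.ofList
    (pvBCases.flatMap (fun rts =>
      rts.2.1.flatMap (fun xys =>
        xys.2.map (fun y => ((rts.1, rts.1 + rts.2.2 * y), xys.1)))))

def GetCaseCorners_alt (Real_Num : Int) (Actual_Position : Int) : Option String :=
  pvLookup.get? (Real_Num, Actual_Position)

-- ===== PRECONDITION & SPEC =====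
def Spec_GetCaseCorners (Real_Num : Int) (Actual_Position : Int) (out : Option String) : Prop := out = GetCaseCorners_alt Real_Num Actual_Position
instance (Real_Num : Int) (Actual_Position : Int) (out : Option String) : Decidable (Spec_GetCaseCorners Real_Num Actual_Position out) := by unfold Spec_GetCaseCorners; infer_instance

-- ===== CLAIM (what is proved, stated in full; the proofs are below) =====
def Claim_equal_GetCaseCorners : Prop := ∀ (Real_Num : Int) (Actual_Position : Int), Dom_GetCaseCorners Real_Num Actual_Position → Spec_GetCaseCorners Real_Num Actual_Position (GetCaseCorners Real_Num Actual_Position)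

-- ===== LEMMAS AND PROOFS =====
theorem pvBeqPair (a b c d : Int) : ((a,b) == (c,d)) = (a == c && b == d) := rfl

-- the built lookup table, evaluated
theorem pvLookup_eval : pvLookup = PySem.Dict.mk [((6,2),"1"),((6,6),"1"),((6,0),"2"),((6,8),"2"),((6,3),"3"),((6,7),"3"),((6,1),"4"),((6,5),"4"),((8,0),"1"),((8,8),"1"),((8,2),"2"),((8,6),"2"),((8,5),"3"),((8,7),"3"),((8,3),"4"),((8,1),"4"),((2,6),"1"),((2,2),"1"),((2,8),"2"),((2,0),"2"),((2,5),"3"),((2,1),"3"),((2,7),"4"),((2,3),"4"),((0,8),"1"),((0,0),"1"),((0,6),"2"),((0,2),"2"),((0,3),"3"),((0,1),"3"),((0,5),"4"),((0,7),"4")] := by rfl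

-- ===== VERDICT (by name: the statement is the Claim_ definition above) =====
theorem GetCaseCorners_spec : Claim_equal_GetCaseCorners := by
  intro rn ap _
  unfold Spec_GetCaseCorners GetCaseCorners GetCaseCorners_alt
  rw [pvLookup_eval]
  by_cases h6 : rn = 6
  · subst h6
    simp only [pvCase1, pvScan, List.find?, PySem.Dict.get?_mk_cons, pvBeqPair]
    norm_num
    split_ifs
    all_goals (first | rfl | omega | (subst_vars; rfl) | (simp_all [PySem.Dict.get?, eq_comm]; try omega))
  rw [if_neg h6]
  by_cases h8 : rn = 8
  · subst h8
    simp only [pvCase2, pvScan, List.find?, PySem.Dict.get?_mk_cons, pvBeqPair]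
    norm_num
    split_ifs
    all_goals (first | rfl | omega | (subst_vars; rfl) | (simp_all [PySem.Dict.get?, eq_comm]; try omega))
  rw [if_neg h8]
  by_cases h2 : rn = 2
  · subst h2
    simp only [pvCase1, pvScan, List.find?, PySem.Dict.get?_mk_cons, pvBeqPair]
    norm_num
    split_ifs
    all_goals (first | rfl | omega | (subst_vars; rfl) | (simp_all [PySem.Dict.get?, eq_comm]; try omega))
  rw [if_neg h2]
  by_cases h0 : rn = 0
  · subst h0
    simp only [pvCase2, pvScan, List.find?, PySem.Dict.get?_mk_cons, pvBeqPair]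
    norm_num
    split_ifs
    all_goals (first | rfl | omega | (subst_vars; rfl) | (simp_all [PySem.Dict.get?, eq_comm]; try omega))
  rw [if_neg h0]
  have h6' : ((6:Int) == rn) = false := beq_eq_false_iff_ne.mpr (fun e => h6 e.symm)
  have h8' : ((8:Int) == rn) = false := beq_eq_false_iff_ne.mpr (fun e => h8 e.symm)
  have h2' : ((2:Int) == rn) = false := beq_eq_false_iff_ne.mpr (fun e => h2 e.symm)
  have h0' : ((0:Int) == rn) = false := beq_eq_false_iff_ne.mpr (fun e => h0 e.symm)
  simp [pvBeqPair, h6', h8', h2', h0', PySem.Dict.get?]
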